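-- pv_equiv track=rewrite | github.com/flabby1976/AoC-2020 | day24/day24-2.py | tile_from_route
-- ===== SOURCE A (Python) =====
-- neighbours = {'e':(2,0), 'se':(1,-1), 'sw':(-1, -1), 'w':(-2,0), 'nw':(-1,1), 'ne':(1,1)}
--
-- def tile_from_route(r):
--     x=0
--     y=0
--     for s in r:
--         dx, dy = neighbours[s]
--         x += dx
--         y += dy
--     return (x,y)
-- ===== SOURCE B (Python) =====
-- neighbours = {'e':(2,0), 'se':(1,-1), 'sw':(-1, -1), 'w':(-2,0), 'nw':(-1,1), 'ne':(1,1)}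
--
-- def tile_from_route(r):
--     tally = {}
--     for s in r:
--         tally[s] = tally.get(s, 0) + 1
--     x = sum(n * neighbours[s][0] for s, n in tally.items())
--     y = sum(n * neighbours[s][1] for s, n in tally.items())
--     return (x, y)
-- ===== Notes on version B (the rewrite author's own statement) =====
-- stated objective: alternative
-- what changed: B first builds a frequency table of the route's direction tokens in one pass, then combines the six offsets once per distinct token weighted by its count, instead of A's per-step coordinate accumulation.
import Mathlib
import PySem

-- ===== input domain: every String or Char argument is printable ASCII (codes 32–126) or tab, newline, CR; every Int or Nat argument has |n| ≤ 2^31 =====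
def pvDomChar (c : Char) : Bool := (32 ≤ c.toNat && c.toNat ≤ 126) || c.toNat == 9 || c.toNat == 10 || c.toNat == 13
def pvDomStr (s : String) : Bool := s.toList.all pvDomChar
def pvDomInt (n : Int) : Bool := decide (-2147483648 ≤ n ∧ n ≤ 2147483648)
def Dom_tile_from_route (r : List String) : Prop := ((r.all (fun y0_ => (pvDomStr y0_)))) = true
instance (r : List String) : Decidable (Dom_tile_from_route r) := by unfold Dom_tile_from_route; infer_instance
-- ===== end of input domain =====

-- B replaces A's per-step accumulation by a frequency table of the route plus one weighted
-- combination per distinct direction token (alternative decomposition, same O(n) cost).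

-- ===== PORT A =====
-- module constant 'neighbours' (shared context of both Pythons)
def neighboursDict : PySem.Dict String (Int × Int) :=
  PySem.Dict.ofList [("e", (2, 0)), ("se", (1, -1)), ("sw", (-1, -1)),
                     ("w", (-2, 0)), ("nw", (-1, 1)), ("ne", (1, 1))]

-- 'neighbours[s]' raises KeyError on unknown tokens; Pre_ excludes those, so getD's default is never used
def tile_from_route (r : List String) : Int × Int :=
  r.foldl (fun xy s =>
    (xy.1 + (PySem.Dict.getD neighboursDict s (0, 0)).1,
     xy.2 + (PySem.Dict.getD neighboursDict s (0, 0)).2)) (0, 0)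

-- ===== PORT B =====
def tile_from_route_alt (r : List String) : Int × Int :=
  let tally : PySem.Dict String Int :=
    r.foldl (fun d s => d.insert s (d.getD s 0 + 1)) PySem.Dict.empty
  ((tally.items.map (fun it => it.2 * (PySem.Dict.getD neighboursDict it.1 (0, 0)).1)).sum,
   (tally.items.map (fun it => it.2 * (PySem.Dict.getD neighboursDict it.1 (0, 0)).2)).sum)

-- ===== PRECONDITION & SPEC =====
-- Pre_ excludes routes containing a token outside the six directions: there the Python A raises KeyError.
def Pre_tile_from_route (r : List String) : Prop :=
  ∀ s ∈ r, s ∈ ["e", "se", "sw", "w", "nw", "ne"]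
instance (r : List String) : Decidable (Pre_tile_from_route r) := by
  unfold Pre_tile_from_route; infer_instance

def pvWitness_tile_from_route : List String := ["e", "ne", "ne", "w", "sw"]

def Spec_tile_from_route (r : List String) (out : Int × Int) : Prop := out = tile_from_route_alt r
instance (r : List String) (out : Int × Int) : Decidable (Spec_tile_from_route r out) := by
  unfold Spec_tile_from_route; infer_instance

-- ===== CLAIM (what is proved, stated in full; the proofs are below) =====
def Claim_equal_tile_from_route : Prop :=
  ∀ (r : List String), Dom_tile_from_route r → Pre_tile_from_route r →
    Spec_tile_from_route r (tile_from_route r)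

-- ===== LEMMAS AND PROOFS =====

-- the offset looked up for a token
def nb (s : String) : Int × Int := PySem.Dict.getD neighboursDict s (0, 0)

theorem toFinset_setOfList (l : List String) :
    (PySem.Set.ofList l).toFinset = l.toFinset := by
  ext x
  simp [List.mem_toFinset, PySem.Set.mem_ofList]

theorem weighted_sum_eq (l : List String) (h : String → Int) :
    ((PySem.Set.ofList l).map (fun k => (l.count k : Int) * h k)).sum = (l.map h).sum := by
  rw [← List.sum_toFinset _ (PySem.Set.nodup_ofList l), toFinset_setOfList,
      Finset.sum_list_map_count l h]
  simp

theorem tile_from_route_eq (r : List String) :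
    tile_from_route r = ((r.map (fun s => (nb s).1)).sum, (r.map (fun s => (nb s).2)).sum) := by
  have hnb : ∀ s, PySem.Dict.getD neighboursDict s (0, 0) = nb s := fun _ => rfl
  unfold tile_from_route
  simp only [hnb]
  rw [PySem.List.foldl_prod_mk (f := fun acc s => acc + (nb s).1)
        (g := fun acc s => acc + (nb s).2),
      PySem.List.foldl_add, PySem.List.foldl_add]
  simp

theorem tile_from_route_alt_eq (r : List String) :
    tile_from_route_alt r
      = (((PySem.Set.ofList r).map (fun k => (r.count k : Int) * (nb k).1)).sum,
         ((PySem.Set.ofList r).map (fun k => (r.count k : Int) * (nb k).2)).sum) := by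
  have hnb : ∀ s, PySem.Dict.getD neighboursDict s (0, 0) = nb s := fun _ => rfl
  simp only [tile_from_route_alt, hnb, PySem.Dict.foldl_insert_getD_add_one_eq_counter,
    PySem.Dict.items_counter, List.map_map, Function.comp_def]

-- ===== VERDICT (by name: the statement is the Claim_ definition above) =====
theorem tile_from_route_spec : Claim_equal_tile_from_route := by
  intro r _ _
  unfold Spec_tile_from_route
  rw [tile_from_route_eq, tile_from_route_alt_eq, weighted_sum_eq, weighted_sum_eq]
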